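-- pv_equiv track=rewrite | github.com/yannickloth/W33-Theory | scripts/w33_holography.py | brute_force_min_cut_for_size
-- ===== SOURCE A (Python) =====
-- from typing import List
--
-- def edge_boundary_size(adj: List[List[int]], S: set) -> int:
--     count = 0
--     for u in S:
--         for v in adj[u]:
--             if v not in S:
--                 count += 1
--     return count
--
-- def brute_force_min_cut_for_size(adj: List[List[int]], size: int) -> int:
--     # brute-force search for the minimal boundary among subsets of given size
--     from itertools import combinations
--
--     n = len(adj)
--     best = n * 100
--     for comb in combinations(range(n), size):
--         S = set(comb)
--         b = edge_boundary_size(adj, S)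
--         if b < best:
--             best = b
--     return best
-- ===== SOURCE B (Python) =====
-- def brute_force_min_cut_for_size(adj, size):
--     # same search, but the boundary is one pass over a precomputed flat edge list
--     from itertools import combinations
--     n = len(adj)
--     edges = [(u, v) for u in range(n) for v in adj[u]]
--     best = n * 100
--     for comb in combinations(range(n), size):
--         S = set(comb)
--         b = 0
--         for u, v in edges:
--             if u in S and v not in S:
--                 b += 1
--         if b < best:
--             best = b
--     return best
-- ===== Notes on version B (the rewrite author's own statement) =====
-- stated objective: alternative
-- what changed: The per-subset boundary computation no longer walks S and indexes into the adjacency lists; instead a flat directed-edge list is precomputed once and each subset's boundary is a single counting pass over it.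
import Mathlib
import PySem

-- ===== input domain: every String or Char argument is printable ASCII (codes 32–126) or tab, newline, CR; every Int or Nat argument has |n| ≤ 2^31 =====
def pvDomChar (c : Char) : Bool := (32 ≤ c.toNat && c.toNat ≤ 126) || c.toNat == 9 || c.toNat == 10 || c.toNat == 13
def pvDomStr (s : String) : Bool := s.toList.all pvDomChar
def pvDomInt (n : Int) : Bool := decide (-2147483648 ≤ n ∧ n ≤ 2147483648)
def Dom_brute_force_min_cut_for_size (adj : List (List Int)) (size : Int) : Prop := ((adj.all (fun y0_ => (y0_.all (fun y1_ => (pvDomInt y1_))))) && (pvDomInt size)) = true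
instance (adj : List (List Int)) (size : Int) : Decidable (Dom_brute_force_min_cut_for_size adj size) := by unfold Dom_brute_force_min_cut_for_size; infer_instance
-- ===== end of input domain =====

-- B replaces A's per-subset walk over S with adjacency indexing by a single counting
-- pass over a precomputed flat edge list; same minimum, proved equal for size ≥ 0.


-- ===== PORT A =====
-- edge_boundary_size: iterates the set S (the result is a sum, so independent of
-- Python's hash order); adj[u] is always in range here because S ⊆ range(n).
def pvEdgeBoundary (adj : List (List Int)) (S : PySem.Set Int) : Int :=
  S.foldl (fun count u =>
    ((PySem.List.pyGet? adj u).getD []).foldl (fun count v =>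
      if PySem.Set.contains S v then count else count + 1) count) 0

def brute_force_min_cut_for_size (adj : List (List Int)) (size : Int) : Int :=
  let n := adj.length
  let best := (n : Int) * 100
  (PySem.List.combinations (PySem.List.pyRange 0 n 1) size.toNat).foldl
    (fun best comb =>
      let S := PySem.Set.ofList comb
      let b := pvEdgeBoundary adj S
      if b < best then b else best) best

-- ===== PORT B =====
def brute_force_min_cut_for_size_alt (adj : List (List Int)) (size : Int) : Int :=
  let n := adj.length
  let edges := (PySem.List.pyRange 0 n 1).flatMap
    (fun u => ((PySem.List.pyGet? adj u).getD []).map (fun v => (u, v)))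
  let best := (n : Int) * 100
  (PySem.List.combinations (PySem.List.pyRange 0 n 1) size.toNat).foldl
    (fun best comb =>
      let S := PySem.Set.ofList comb
      let b := edges.foldl (fun b e =>
        if PySem.Set.contains S e.1 && !(PySem.Set.contains S e.2) then b + 1 else b) 0
      if b < best then b else best) best

-- ===== PRECONDITION & SPEC =====
-- Pre_ excludes only size < 0, where Python's combinations raises ValueError.
def Pre_brute_force_min_cut_for_size (adj : List (List Int)) (size : Int) : Prop := 0 ≤ size
instance (adj : List (List Int)) (size : Int) : Decidable (Pre_brute_force_min_cut_for_size adj size) := by unfold Pre_brute_force_min_cut_for_size; infer_instance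
def pvWitness_brute_force_min_cut_for_size : List (List Int) × Int := ([[1], [0]], 1)

def Spec_brute_force_min_cut_for_size (adj : List (List Int)) (size : Int) (out : Int) : Prop := out = brute_force_min_cut_for_size_alt adj size
instance (adj : List (List Int)) (size : Int) (out : Int) : Decidable (Spec_brute_force_min_cut_for_size adj size out) := by unfold Spec_brute_force_min_cut_for_size; infer_instance

-- ===== CLAIM (what is proved, stated in full; the proofs are below) =====
def Claim_equal_brute_force_min_cut_for_size : Prop := ∀ (adj : List (List Int)) (size : Int), Dom_brute_force_min_cut_for_size adj size → Pre_brute_force_min_cut_for_size adj size → Spec_brute_force_min_cut_for_size adj size (brute_force_min_cut_for_size adj size)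

-- ===== LEMMAS AND PROOFS =====

-- the per-vertex outgoing-boundary weight
def pvG (adj : List (List Int)) (S : List Int) (u : Int) : Int :=
  (((PySem.List.pyGet? adj u).getD []).map
    (fun v => if PySem.Set.contains S v then 0 else 1)).sum

lemma pvInnerFold (S : List Int) (l : List Int) (c : Int) :
    l.foldl (fun count v => if PySem.Set.contains S v then count else count + 1) c
      = c + (l.map (fun v => if PySem.Set.contains S v then (0 : Int) else 1)).sum := by
  rw [PySem.List.foldl_congr_mem l _
        (fun count v => count + (if PySem.Set.contains S v then (0 : Int) else 1)) c
        (by intro acc x _; split <;> simp_all)]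
  exact PySem.List.foldl_add l _ c

lemma pvEdgeBoundary_eq_sum (adj : List (List Int)) (S : List Int) :
    pvEdgeBoundary adj S = (S.map (pvG adj S)).sum := by
  unfold pvEdgeBoundary
  rw [PySem.List.foldl_congr_mem S _ (fun count u => count + pvG adj S u) 0
        (by intro acc u _; rw [pvInnerFold]; rfl)]
  rw [PySem.List.foldl_add S (pvG adj S) 0, zero_add]

lemma pvEdgeFold_eq_sum (adj : List (List Int)) (S : List Int) :
    ((PySem.List.pyRange 0 adj.length 1).flatMap
        (fun u => ((PySem.List.pyGet? adj u).getD []).map (fun v => (u, v)))).foldl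
      (fun b e => if PySem.Set.contains S e.1 && !(PySem.Set.contains S e.2) then b + 1 else b) 0
    = ((PySem.List.pyRange 0 adj.length 1).map
        (fun u => if u ∈ S then pvG adj S u else 0)).sum := by
  rw [PySem.List.foldl_congr_mem _ _
        (fun b (e : Int × Int) =>
          b + (if PySem.Set.contains S e.1 && !(PySem.Set.contains S e.2) then (1 : Int) else 0)) 0
        (by intro acc e _; split <;> simp_all)]
  rw [PySem.List.foldl_add _ _ 0, zero_add, List.flatMap_def, List.map_flatten,
      List.sum_flatten, List.map_map, List.map_map]
  refine congrArg List.sum (List.map_congr_left ?_)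
  intro u _
  simp only [Function.comp_def, List.map_map]
  by_cases hu : u ∈ S
  · have hc : PySem.Set.contains S u = true := (PySem.Set.contains_iff S u).mpr hu
    rw [if_pos hu]
    unfold pvG
    refine congrArg List.sum (List.map_congr_left ?_)
    intro v _
    simp only [hc, Bool.true_and]
    cases hcv : PySem.Set.contains S v <;> norm_num
  · have hc : PySem.Set.contains S u = false := by
      rcases Bool.eq_false_or_eq_true (PySem.Set.contains S u) with h | h
      · exact absurd ((PySem.Set.contains_iff S u).mp h) hu
      · exact h
    rw [if_neg hu]
    have h0 : (((PySem.List.pyGet? adj u).getD []).map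
          (fun v => if PySem.Set.contains S u && !(PySem.Set.contains S v) then (1 : Int) else 0))
        = ((PySem.List.pyGet? adj u).getD []).map (fun _ => (0 : Int)) :=
      List.map_congr_left (fun v _ => by simp only [hc, Bool.false_and]; norm_num)
    rw [h0]
    simp

lemma sum_filter_sublist (g : Int → Int) {l L : List Int} (h : l.Sublist L) (hnd : L.Nodup) :
    (L.map (fun u => if u ∈ l then g u else 0)).sum = (l.map g).sum := by
  induction h with
  | slnil => simp
  | @cons l' L' x h ih =>
      rcases hnd with _ | ⟨hx, hnd'⟩
      have hxl : x ∉ l' := fun hm => (hx x (h.subset hm)) rfl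
      simp [hxl, ih hnd']
  | @cons₂ l' L' x h ih =>
      rcases hnd with _ | ⟨hx, hnd'⟩
      have : ∀ u ∈ L', (if u ∈ x :: l' then g u else 0) = (if u ∈ l' then g u else 0) := by
        intro u hu
        have hux : u ≠ x := fun e => (hx u hu) e.symm
        simp [List.mem_cons, hux]
      rw [List.map_cons, if_pos (List.mem_cons_self), List.sum_cons,
          List.map_congr_left this, ih hnd', List.map_cons, List.sum_cons]

-- ===== VERDICT (by name: the statement is the Claim_ definition above) =====
theorem brute_force_min_cut_for_size_spec : Claim_equal_brute_force_min_cut_for_size := by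
  intro adj size _ _
  unfold Spec_brute_force_min_cut_for_size
  unfold brute_force_min_cut_for_size brute_force_min_cut_for_size_alt
  dsimp only
  refine PySem.List.foldl_congr_mem _ _ _ _ ?_
  intro acc comb hcomb
  have hsub : comb.Sublist (PySem.List.pyRange 0 (adj.length) 1) :=
    PySem.List.sublist_of_mem_combinations hcomb
  have hnodR : (PySem.List.pyRange 0 (adj.length : Int) 1).Nodup :=
    PySem.List.nodup_pyRange_one 0 (adj.length : Int)
  have hnod : comb.Nodup := hsub.nodup hnodR
  have hS : PySem.Set.ofList comb = comb := PySem.Set.ofList_eq_self_of_nodup comb hnod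
  rw [hS, pvEdgeBoundary_eq_sum, pvEdgeFold_eq_sum, sum_filter_sublist (pvG adj comb) hsub hnodR]
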